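-- pv_equiv track=rewrite | github.com/holbizmetrics/primes-research | factoring_maxsat.py | compute_ones_from_pp
-- ===== SOURCE A (Python) =====
-- def compute_ones_from_pp(p, q, bits):
--     """Compute true onesFromPP values"""
--     ones = []
--     for k in range(2 * bits - 1):
--         count = 0
--         for i in range(bits):
--             j = k - i
--             if 0 <= j < bits:
--                 pi = (p >> i) & 1
--                 qj = (q >> j) & 1
--                 count += pi * qj
--         ones.append(count)
--     return ones
-- ===== SOURCE B (Python) =====
-- def compute_ones_from_pp(p, q, bits):
--     """Compute true onesFromPP values"""
--     if bits <= 0: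
--         return []
--     blk = bits.bit_length()
--     m = 1 << bits
--     sp = _spread(p % m, bits, blk)
--     sq = _spread(q % m, bits, blk)
--     prod = sp * sq
--     base = 1 << blk
--     return [(prod >> (blk * k)) % base for k in range(2 * bits - 1)]
--
--
-- def _spread(x, bits, blk):
--     """Pack the low `bits` bits of x into consecutive blk-bit digits of one integer."""
--     s = 0
--     for i in range(bits):
--         s += ((x >> i) & 1) << (blk * i)
--     return s
-- ===== Notes on version B (the rewrite author's own statement) =====
-- stated objective: faster
-- what changed: Replaces the nested Python loops over (k, i) by bit-packing the two bit vectors into blk-bit digits of two big integers and taking ONE big-integer product, whose base-2^blk digits are exactly the convolution counts.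
import Mathlib
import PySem

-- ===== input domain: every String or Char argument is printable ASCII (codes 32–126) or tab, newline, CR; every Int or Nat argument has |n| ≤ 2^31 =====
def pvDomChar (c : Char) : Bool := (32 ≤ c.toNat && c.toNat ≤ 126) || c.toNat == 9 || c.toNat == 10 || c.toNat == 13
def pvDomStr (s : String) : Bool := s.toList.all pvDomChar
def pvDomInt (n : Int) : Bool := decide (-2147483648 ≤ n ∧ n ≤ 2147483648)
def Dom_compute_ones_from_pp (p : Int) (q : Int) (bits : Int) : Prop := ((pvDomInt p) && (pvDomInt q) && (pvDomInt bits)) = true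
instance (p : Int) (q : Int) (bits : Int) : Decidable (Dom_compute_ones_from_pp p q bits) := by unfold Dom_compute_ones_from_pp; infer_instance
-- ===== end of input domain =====

-- B replaces A's nested loops by bit-packing both bit vectors into blk-bit digits of two
-- integers and taking one integer product whose base-2^blk digits are the convolution counts.

-- ===== PORT A =====
-- literal port of A: for k in range(2*bits-1): for i in range(bits): j = k - i;
-- if 0 <= j < bits: count += ((p >> i) & 1) * ((q >> j) & 1).  Python's '>>' is Lean's '>>>'
-- (the shift amounts i and j are ≥ 0 where evaluated, so .toNat is exact); '& 1' is PySem.Int.band · 1.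
def compute_ones_from_pp (p : Int) (q : Int) (bits : Int) : List Int :=
  (PySem.List.pyRange 0 (2 * bits - 1) 1).foldl (fun ones k =>
    ones ++ [(PySem.List.pyRange 0 bits 1).foldl (fun count i =>
      let j := k - i
      if 0 ≤ j ∧ j < bits then
        count + PySem.Int.band (p >>> i.toNat) 1 * PySem.Int.band (q >>> j.toNat) 1
      else count) 0]) []

-- ===== PORT B =====
-- literal port of Source B's _spread: s = 0; for i in range(bits): s += ((x >> i) & 1) << (blk * i)
def pvSpread (x : Int) (bits blk : Nat) : Int :=
  (List.range bits).foldl (fun (s : Int) (i : Nat) => s + (PySem.Int.band (x >>> i) 1) <<< (blk * i)) 0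

-- literal port of Source B (after the 'bits <= 0' guard bits > 0, so bits.toNat is exact;
-- Python '%' with the positive moduli 1 << bits and 1 << blk is PySem.Int.mod).
def compute_ones_from_pp_alt (p : Int) (q : Int) (bits : Int) : List Int :=
  if bits ≤ 0 then []
  else
    let b := bits.toNat
    let blk := PySem.Int.bitLength bits
    let m : Int := (1 : Int) <<< b
    let sp := pvSpread (PySem.Int.mod p m) b blk
    let sq := pvSpread (PySem.Int.mod q m) b blk
    let prod := sp * sq
    let base : Int := (1 : Int) <<< blk
    (List.range (2 * b - 1)).map (fun k => PySem.Int.mod (prod >>> (blk * k)) base)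

-- ===== PRECONDITION & SPEC =====
def Spec_compute_ones_from_pp (p : Int) (q : Int) (bits : Int) (out : List Int) : Prop := out = compute_ones_from_pp_alt p q bits
instance (p : Int) (q : Int) (bits : Int) (out : List Int) : Decidable (Spec_compute_ones_from_pp p q bits out) := by unfold Spec_compute_ones_from_pp; infer_instance

-- ===== CLAIM (what is proved, stated in full; the proofs are below) =====
def Claim_equal_compute_ones_from_pp : Prop := ∀ (p : Int) (q : Int) (bits : Int), Dom_compute_ones_from_pp p q bits → Spec_compute_ones_from_pp p q bits (compute_ones_from_pp p q bits)

-- ===== LEMMAS AND PROOFS =====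

-- bit i of x (Python's (x >> i) & 1), in arithmetic form
def pvBit (x : Int) (i : Nat) : Int := x / 2 ^ i % 2

-- coefficient k of the product of the two bit polynomials (= A's inner count)
def pvCoef (p q : Int) (b k : Nat) : Int :=
  ∑ i ∈ Finset.range b, if i ≤ k ∧ k - i < b then pvBit p i * pvBit q (k - i) else 0

theorem pvBit_nonneg (x : Int) (i : Nat) : 0 ≤ pvBit x i := by
  unfold pvBit; exact Int.emod_nonneg _ (by norm_num)

theorem pvBit_le_one (x : Int) (i : Nat) : pvBit x i ≤ 1 := by
  unfold pvBit
  have := Int.emod_lt_of_pos (x / 2 ^ i) (b := 2) (by norm_num)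
  omega

theorem pvBit_eq (x : Int) (i : Nat) : PySem.Int.band (x >>> i) 1 = pvBit x i := by
  rw [PySem.Int.band_one, PySem.Int.mod_eq_emod_of_pos (by norm_num), Int.shiftRight_eq_div_pow]
  push_cast
  rfl

-- the low bits are unchanged by reduction mod 2^b
theorem pvBit_emod (x : Int) (i b : Nat) (h : i < b) : pvBit (x % 2 ^ b) i = pvBit x i := by
  unfold pvBit
  have hsplit : (x % 2 ^ b : Int) = x + (-((x / 2 ^ b) * 2 ^ (b - i - 1)) * 2) * 2 ^ i := by
    rw [Int.emod_def]
    have h2 : (2 : Int) ^ b = 2 ^ (b - i - 1) * 2 ^ i * 2 := by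
      have hb : b = (b - i - 1) + i + 1 := by omega
      calc (2 : Int) ^ b = 2 ^ ((b - i - 1) + i + 1) := by rw [← hb]
        _ = 2 ^ (b - i - 1) * 2 ^ i * 2 := by rw [pow_add, pow_add, pow_one]
    rw [h2]; ring
  rw [hsplit, Int.add_mul_ediv_right _ _ (by positivity)]
  have h3 : x / 2 ^ i + -(x / 2 ^ b * 2 ^ (b - i - 1)) * 2 =
      x / 2 ^ i + 2 * -(x / 2 ^ b * 2 ^ (b - i - 1)) := by ring
  rw [h3, Int.add_mul_emod_self_left]

-- a fold of successive additions is a Finset sum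
theorem pvFoldAdd (f : Nat → Int) (n : Nat) (c : Int) :
    (List.range n).foldl (fun s i => s + f i) c = c + ∑ i ∈ Finset.range n, f i := by
  induction n with
  | zero => simp
  | succ n ih => rw [List.range_succ, List.foldl_append, ih, Finset.sum_range_succ]; simp [add_assoc]

-- value of the packing loop
theorem pvSpread_eq (x : Int) (b blk : Nat) :
    pvSpread x b blk = ∑ i ∈ Finset.range b, pvBit x i * (2 ^ blk) ^ i := by
  unfold pvSpread
  have hf : (fun (s : Int) (i : Nat) => s + (PySem.Int.band (x >>> i) 1) <<< (blk * i))
      = fun s i => s + pvBit x i * (2 ^ blk) ^ i := by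
    funext s i
    rw [Int.shiftLeft_eq, pvBit_eq, pow_mul]
  rw [hf, pvFoldAdd, zero_add]

-- digit sums with digits < B lie in [0, B^n - 1]
theorem pvSumBound (B : Int) (c : Nat → Int) (n : Nat)
    (hc : ∀ j, j < n → 0 ≤ c j ∧ c j < B) (hB : 0 < B) :
    0 ≤ ∑ j ∈ Finset.range n, c j * B ^ j ∧ ∑ j ∈ Finset.range n, c j * B ^ j ≤ B ^ n - 1 := by
  induction n with
  | zero => simp
  | succ n ih =>
    obtain ⟨h0, h1⟩ := ih (fun j hj => hc j (by omega))
    obtain ⟨hcn0, hcn1⟩ := hc n (by omega)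
    have hpow : (0 : Int) < B ^ n := by positivity
    rw [Finset.sum_range_succ]
    constructor
    · nlinarith
    · have hc' : c n ≤ B - 1 := by omega
      have := pow_succ B n
      nlinarith

-- digit extraction from a base-B expansion with digits < B
theorem pvDigit (B : Int) (hB : 0 < B) (c : Nat → Int) (n k : Nat) (hk : k < n)
    (hc : ∀ j, j < n → 0 ≤ c j ∧ c j < B) :
    (∑ j ∈ Finset.range n, c j * B ^ j) / B ^ k % B = c k := by
  have hpk : (0 : Int) < B ^ k := by positivity
  have hsplit : ∑ j ∈ Finset.range n, c j * B ^ j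
      = (∑ j ∈ Finset.range k, c j * B ^ j) + ∑ j ∈ Finset.Ico k n, c j * B ^ j := by
    rw [Finset.range_eq_Ico]
    exact (Finset.sum_Ico_consecutive _ (Nat.zero_le k) hk.le).symm
  set L := ∑ j ∈ Finset.range k, c j * B ^ j with hL
  set R := ∑ j ∈ Finset.range (n - k - 1), c (k + 1 + j) * B ^ j with hR
  have hIco : ∑ j ∈ Finset.Ico k n, c j * B ^ j = (c k + B * R) * B ^ k := by
    rw [Finset.sum_Ico_eq_sum_range]
    have hnk : n - k = (n - k - 1) + 1 := by omega
    rw [hnk, Finset.sum_range_succ']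
    simp only [Nat.add_zero]
    rw [hR, Finset.mul_sum]
    calc ∑ j ∈ Finset.range (n - k - 1), c (k + (j + 1)) * B ^ (k + (j + 1)) + c k * B ^ k
        = ∑ j ∈ Finset.range (n - k - 1), B * (c (k + 1 + j) * B ^ j) * B ^ k + c k * B ^ k := by
          refine congrArg (· + c k * B ^ k) (Finset.sum_congr rfl (fun j _ => ?_))
          rw [show k + (j + 1) = k + 1 + j from by omega, pow_add, pow_add, pow_one]
          ring
      _ = (c k + ∑ j ∈ Finset.range (n - k - 1), B * (c (k + 1 + j) * B ^ j)) * B ^ k := by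
          rw [add_mul, Finset.sum_mul]
          ring
  have hL0 : 0 ≤ L ∧ L ≤ B ^ k - 1 := pvSumBound B c k (fun j hj => hc j (by omega)) hB
  have hR0 : 0 ≤ R := (pvSumBound B (fun j => c (k + 1 + j)) (n - k - 1)
      (fun j hj => hc (k + 1 + j) (by omega)) hB).1
  rw [hsplit, hIco, Int.add_mul_ediv_right _ _ (ne_of_gt hpk),
    Int.ediv_eq_zero_of_lt hL0.1 (by omega), zero_add, Int.add_mul_emod_self_left,
    Int.emod_eq_of_lt (hc k hk).1 (hc k hk).2]

-- product of two length-b polynomials at B, as a base-B expansion of the convolution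
theorem pvProdExpand (a d : Nat → Int) (B : Int) (b : Nat) (hb : 1 ≤ b) :
    (∑ i ∈ Finset.range b, a i * B ^ i) * (∑ j ∈ Finset.range b, d j * B ^ j) =
      ∑ k ∈ Finset.range (2 * b - 1),
        (∑ i ∈ Finset.range b, if i ≤ k ∧ k - i < b then a i * d (k - i) else 0) * B ^ k := by
  rw [Finset.sum_mul_sum]
  have hrhs : ∀ k, (∑ i ∈ Finset.range b, if i ≤ k ∧ k - i < b then a i * d (k - i) else 0) * B ^ k
      = ∑ i ∈ Finset.range b, if i ≤ k ∧ k - i < b then a i * d (k - i) * B ^ k else 0 := by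
    intro k
    rw [Finset.sum_mul]
    exact Finset.sum_congr rfl (fun i _ => by split_ifs <;> simp)
  rw [show ∑ k ∈ Finset.range (2 * b - 1),
        (∑ i ∈ Finset.range b, if i ≤ k ∧ k - i < b then a i * d (k - i) else 0) * B ^ k
      = ∑ k ∈ Finset.range (2 * b - 1), ∑ i ∈ Finset.range b,
          if i ≤ k ∧ k - i < b then a i * d (k - i) * B ^ k else 0
    from Finset.sum_congr rfl (fun k _ => hrhs k)]
  rw [show (∑ k ∈ Finset.range (2 * b - 1), ∑ i ∈ Finset.range b,
          if i ≤ k ∧ k - i < b then a i * d (k - i) * B ^ k else 0)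
      = ∑ i ∈ Finset.range b, ∑ k ∈ Finset.range (2 * b - 1),
          if i ≤ k ∧ k - i < b then a i * d (k - i) * B ^ k else 0 from Finset.sum_comm]
  refine Finset.sum_congr rfl (fun i hi => ?_)
  have hib : i < b := Finset.mem_range.mp hi
  have hfilter : (Finset.range (2 * b - 1)).filter (fun k => i ≤ k ∧ k - i < b)
      = (Finset.range b).image (fun j => i + j) := by
    ext k
    simp only [Finset.mem_filter, Finset.mem_image, Finset.mem_range]
    constructor
    · rintro ⟨hk, hik, hkib⟩; exact ⟨k - i, hkib, by omega⟩
    · rintro ⟨j, hj, rfl⟩; refine ⟨by omega, by omega, by omega⟩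
  calc ∑ j ∈ Finset.range b, a i * B ^ i * (d j * B ^ j)
      = ∑ j ∈ Finset.range b, a i * d ((i + j) - i) * B ^ (i + j) := by
        refine Finset.sum_congr rfl (fun j _ => ?_)
        rw [pow_add]
        simp only [Nat.add_sub_cancel_left]
        ring
    _ = ∑ k ∈ (Finset.range b).image (fun j => i + j), a i * d (k - i) * B ^ k := by
        rw [Finset.sum_image (fun x _ y _ h => by omega)]
    _ = ∑ k ∈ (Finset.range (2 * b - 1)).filter (fun k => i ≤ k ∧ k - i < b),
          a i * d (k - i) * B ^ k := by rw [hfilter]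
    _ = ∑ k ∈ Finset.range (2 * b - 1), if i ≤ k ∧ k - i < b then a i * d (k - i) * B ^ k else 0 := by
        rw [Finset.sum_filter]

-- the convolution coefficients are nonnegative and < 2^blk once b < 2^blk
theorem pvCoef_bounds (p q : Int) (b blk k : Nat) (hb : b < 2 ^ blk) :
    0 ≤ pvCoef p q b k ∧ pvCoef p q b k < (2 : Int) ^ blk := by
  unfold pvCoef
  constructor
  · refine Finset.sum_nonneg (fun i _ => ?_)
    split_ifs
    · exact mul_nonneg (pvBit_nonneg p i) (pvBit_nonneg q (k - i))
    · exact le_refl 0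
  · have h1 : ∑ i ∈ Finset.range b, (if i ≤ k ∧ k - i < b then pvBit p i * pvBit q (k - i) else 0)
        ≤ ∑ i ∈ Finset.range b, (1 : Int) := by
      refine Finset.sum_le_sum (fun i _ => ?_)
      split_ifs
      · nlinarith [pvBit_nonneg p i, pvBit_le_one p i, pvBit_nonneg q (k - i), pvBit_le_one q (k - i)]
      · norm_num
    have h2 : ∑ i ∈ Finset.range b, (1 : Int) = b := by simp
    have h3 : (b : Int) < (2 : Int) ^ blk := by exact_mod_cast hb
    rw [h2] at h1
    exact lt_of_le_of_lt h1 h3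

-- A's inner loop computes pvCoef
theorem pvA_inner (p q bits : Int) (hpos : 0 < bits) (k : Nat) :
    (PySem.List.pyRange 0 bits 1).foldl (fun count i =>
      let j := (k : Int) - i
      if 0 ≤ j ∧ j < bits then
        count + PySem.Int.band (p >>> i.toNat) 1 * PySem.Int.band (q >>> j.toNat) 1
      else count) 0 = pvCoef p q bits.toNat k := by
  rw [PySem.List.pyRange_one, List.foldl_map]
  have hf : (fun (count : Int) (t : Nat) =>
        (fun count (i : Int) =>
          let j := (k : Int) - i
          if 0 ≤ j ∧ j < bits then
            count + PySem.Int.band (p >>> i.toNat) 1 * PySem.Int.band (q >>> j.toNat) 1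
          else count) count ((0 : Int) + (t : Int)))
      = fun count t => count +
          (if t ≤ k ∧ k - t < bits.toNat then pvBit p t * pvBit q (k - t) else 0) := by
    funext count t
    simp only [zero_add]
    by_cases hcond : 0 ≤ (k : Int) - (t : Int) ∧ (k : Int) - (t : Int) < bits
    · rw [if_pos hcond, if_pos (by omega)]
      have ht1 : ((t : Int)).toNat = t := by omega
      have ht2 : ((k : Int) - (t : Int)).toNat = k - t := by omega
      rw [ht1, ht2, pvBit_eq, pvBit_eq]
    · rw [if_neg hcond, if_neg (by omega), add_zero]
  rw [hf, pvFoldAdd, zero_add]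
  have hn : (bits - 0).toNat = bits.toNat := by omega
  rw [hn]
  rfl

-- A as a map of pvCoef over the output indices
theorem pvA_eq (p q bits : Int) (hpos : 0 < bits) :
    compute_ones_from_pp p q bits
      = (List.range (2 * bits.toNat - 1)).map (fun k => pvCoef p q bits.toNat k) := by
  unfold compute_ones_from_pp
  rw [PySem.List.foldl_append_singleton_eq_map, List.nil_append,
    PySem.List.pyRange_one 0 (2 * bits - 1), List.map_map]
  have hn : (2 * bits - 1 - 0).toNat = 2 * bits.toNat - 1 := by omega
  rw [hn]
  refine List.map_congr_left (fun t _ => ?_)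
  simp only [Function.comp_apply, zero_add]
  exact pvA_inner p q bits hpos t

-- B as the same map of pvCoef
theorem pvB_eq (p q bits : Int) (hpos : 0 < bits) :
    compute_ones_from_pp_alt p q bits
      = (List.range (2 * bits.toNat - 1)).map (fun k => pvCoef p q bits.toNat k) := by
  unfold compute_ones_from_pp_alt
  rw [if_neg (by omega)]
  set b := bits.toNat with hbdef
  set blk := PySem.Int.bitLength bits with hblkdef
  have hb1 : 1 ≤ b := by omega
  have hblt : b < 2 ^ blk := by
    have h := PySem.Int.lt_two_pow_bitLength bits
    have habs : bits.natAbs = b := by omega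
    rw [habs] at h
    exact h
  have hBpos : (0 : Int) < 2 ^ blk := by positivity
  have hbpos : (0 : Int) < 2 ^ b := by positivity
  have hm : ((1 : Int) <<< b) = 2 ^ b := by rw [Int.shiftLeft_eq, one_mul]
  have hbase : ((1 : Int) <<< blk) = 2 ^ blk := by rw [Int.shiftLeft_eq, one_mul]
  refine List.map_congr_left (fun k hk => ?_)
  have hk' : k < 2 * b - 1 := List.mem_range.mp hk
  rw [hm, hbase, PySem.Int.mod_eq_emod_of_pos hbpos, PySem.Int.mod_eq_emod_of_pos hbpos,
    PySem.Int.mod_eq_emod_of_pos hBpos, Int.shiftRight_eq_div_pow, pvSpread_eq, pvSpread_eq]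
  have hsp : ∑ i ∈ Finset.range b, pvBit (p % 2 ^ b) i * ((2 : Int) ^ blk) ^ i
      = ∑ i ∈ Finset.range b, pvBit p i * ((2 : Int) ^ blk) ^ i :=
    Finset.sum_congr rfl (fun i hi => by rw [pvBit_emod p i b (Finset.mem_range.mp hi)])
  have hsq : ∑ i ∈ Finset.range b, pvBit (q % 2 ^ b) i * ((2 : Int) ^ blk) ^ i
      = ∑ i ∈ Finset.range b, pvBit q i * ((2 : Int) ^ blk) ^ i :=
    Finset.sum_congr rfl (fun i hi => by rw [pvBit_emod q i b (Finset.mem_range.mp hi)])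
  rw [hsp, hsq, pvProdExpand _ _ _ b hb1]
  have hpow : ((2 ^ (blk * k) : Nat) : Int) = ((2 : Int) ^ blk) ^ k := by
    push_cast
    rw [pow_mul]
  rw [hpow]
  exact pvDigit ((2 : Int) ^ blk) hBpos (fun j => pvCoef p q b j) (2 * b - 1) k hk'
    (fun j _ => pvCoef_bounds p q b blk j hblt)

-- ===== VERDICT (by name: the statement is the Claim_ definition above) =====
theorem compute_ones_from_pp_spec : Claim_equal_compute_ones_from_pp := by
  intro p q bits _
  unfold Spec_compute_ones_from_pp
  by_cases hble : bits ≤ 0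
  · unfold compute_ones_from_pp compute_ones_from_pp_alt
    rw [if_pos hble,
      PySem.List.pyRange_one_eq_nil (a := 0) (b := 2 * bits - 1) (by omega)]
    rfl
  · rw [pvA_eq p q bits (by omega), pvB_eq p q bits (by omega)]
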